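-- pv_equiv track=rewrite | github.com/ayh1885/Python-Job | PythonSample/1G10G_DiffTest.py | CompareDictionary
-- ===== SOURCE A (Python) =====
-- def CompareDictionary(Target : dict, Comp : dict):
--     RetDict = {}
--     for key1, value1 in Target.items():
--         Flag = True
--         for key2, value2 in Comp.items():
--             if key1 == key2 and value1 == value2:
--                 Flag = False
--                 break
--         if Flag:
--             RetDict[key1] = value1
--
--     return dict(sorted(RetDict.items()))
-- ===== SOURCE B (Python) =====
-- def CompareDictionary(Target : dict, Comp : dict):
--     # Sort both item lists once, then sweep them together with two pointers
--     # (merge-style set difference), emitting Target items with no equal Comp item.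
--     t = sorted(Target.items())
--     c = sorted(Comp.items())
--     out = {}
--     j = 0
--     m = len(c)
--     for pair in t:
--         while j < m and c[j] < pair:
--             j += 1
--         if j < m and c[j] == pair:
--             j += 1
--         else:
--             out[pair[0]] = pair[1]
--     return out
-- ===== Notes on version B (the rewrite author's own statement) =====
-- stated objective: faster
-- what changed: Replaces A's nested scan over Comp (Flag/break) plus a final sort of the filtered dict by sorting both item lists once and doing a two-pointer merge sweep that emits the surviving Target items already in sorted order.
import Mathlib
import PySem

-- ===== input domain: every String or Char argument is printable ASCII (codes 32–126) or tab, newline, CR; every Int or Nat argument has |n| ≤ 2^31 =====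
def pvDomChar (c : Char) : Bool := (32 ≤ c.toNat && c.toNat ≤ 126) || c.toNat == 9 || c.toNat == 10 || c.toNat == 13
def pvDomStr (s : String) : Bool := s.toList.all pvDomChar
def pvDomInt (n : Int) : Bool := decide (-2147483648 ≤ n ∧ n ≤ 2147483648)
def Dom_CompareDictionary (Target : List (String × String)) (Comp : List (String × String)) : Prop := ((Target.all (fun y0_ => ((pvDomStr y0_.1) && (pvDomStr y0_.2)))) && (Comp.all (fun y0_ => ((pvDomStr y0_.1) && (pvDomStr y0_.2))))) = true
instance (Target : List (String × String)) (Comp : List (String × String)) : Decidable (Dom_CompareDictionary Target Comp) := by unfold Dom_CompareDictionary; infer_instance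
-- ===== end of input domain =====

-- B sorts both item lists once and sweeps them together with two pointers (merge-style set
-- difference) instead of A's nested scan with a Flag plus a final sort (objective: faster).

-- ===== PORT A =====
-- inner 'for key2, value2 in Comp.items(): if key1 == key2 and value1 == value2: Flag = False; break' — Flag's final value
def pvAFlag (key1 value1 : String) : List (String × String) → Bool
  | [] => true
  | (key2, value2) :: rest =>
      if key1 = key2 ∧ value1 = value2 then false else pvAFlag key1 value1 rest

def CompareDictionary (Target : List (String × String)) (Comp : List (String × String)) : List (String × String) :=
  -- RetDict = {}; for key1, value1 in Target.items(): … ; if Flag: RetDict[key1] = value1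
  let RetDict : PySem.Dict String String :=
    Target.foldl (fun d p => if pvAFlag p.1 p.2 Comp then d.insert p.1 p.2 else d) PySem.Dict.empty
  -- return dict(sorted(RetDict.items()))  (sorted on pairs = lexicographic tuple key)
  (PySem.Dict.ofList (PySem.List.sorted2 RetDict.items (·.1) (·.2))).items

-- ===== PORT B =====
-- Python tuple comparison 'c[j] < pair' on (String, String)
def pvLtP (a b : String × String) : Bool :=
  decide (a.1 < b.1) || (decide (a.1 = b.1) && decide (a.2 < b.2))

-- the sweep: 'for pair in t: while j < m and c[j] < pair: j += 1; if j < m and c[j] == pair: j += 1 else out[...] = ...'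
def pvSweep : PySem.Dict String String → List (String × String) → List (String × String) → PySem.Dict String String
  | out, [], _ => out
  | out, x :: t, [] => pvSweep (out.insert x.1 x.2) t []
  | out, x :: t, y :: c =>
      if pvLtP y x then pvSweep out (x :: t) c
      else if y = x then pvSweep out t c
      else pvSweep (out.insert x.1 x.2) t (y :: c)
termination_by _ t c => t.length + c.length

def CompareDictionary_alt (Target : List (String × String)) (Comp : List (String × String)) : List (String × String) :=
  -- t = sorted(Target.items()); c = sorted(Comp.items()); out = {}; two-pointer sweep; return out
  let t := PySem.List.sorted2 Target (·.1) (·.2)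
  let c := PySem.List.sorted2 Comp (·.1) (·.2)
  (pvSweep PySem.Dict.empty t c).items

-- ===== PRECONDITION & SPEC =====
-- Pre_ excludes association lists with repeated keys in either argument: a Python dict argument can
-- never carry duplicate keys (dict() construction collapses them), so such lists are ambiguous as
-- dict inputs and the ports' readings of them are accidental.
def Pre_CompareDictionary (Target : List (String × String)) (Comp : List (String × String)) : Prop :=
  (Target.map Prod.fst).Nodup ∧ (Comp.map Prod.fst).Nodup
instance (Target : List (String × String)) (Comp : List (String × String)) : Decidable (Pre_CompareDictionary Target Comp) := by unfold Pre_CompareDictionary; infer_instance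

def pvWitness_CompareDictionary : (List (String × String)) × (List (String × String)) :=
  ([("a", "1"), ("b", "2")], [("a", "1"), ("c", "3")])

def Spec_CompareDictionary (Target : List (String × String)) (Comp : List (String × String)) (out : List (String × String)) : Prop := out = CompareDictionary_alt Target Comp
instance (Target : List (String × String)) (Comp : List (String × String)) (out : List (String × String)) : Decidable (Spec_CompareDictionary Target Comp out) := by unfold Spec_CompareDictionary; infer_instance

-- ===== CLAIM (what is proved, stated in full; the proofs are below) =====
def Claim_equal_CompareDictionary : Prop := ∀ (Target : List (String × String)) (Comp : List (String × String)), Dom_CompareDictionary Target Comp → Pre_CompareDictionary Target Comp → Spec_CompareDictionary Target Comp (CompareDictionary Target Comp)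

-- ===== LEMMAS AND PROOFS =====

-- the Python tuple order is the lexicographic order
lemma pvLtP_iff (a b : String × String) : pvLtP a b = true ↔ toLex a < toLex b := by
  simp [pvLtP, Prod.Lex.lt_iff]

lemma contains_cons_of_ne (y p : String × String) (c : List (String × String)) (h : ¬ p = y) :
    ((y :: c).contains p) = c.contains p := by
  rw [Bool.eq_iff_iff]
  simp [List.mem_cons, h]

-- A's inner loop returns True exactly when the pair is absent from Comp
lemma pvAFlag_eq_not_contains (k v : String) (Comp : List (String × String)) :
    pvAFlag k v Comp = !Comp.contains (k, v) := by
  induction Comp with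
  | nil => rfl
  | cons p rest ih =>
      obtain ⟨k2, v2⟩ := p
      by_cases h : k = k2 ∧ v = v2
      · simp [pvAFlag, h]
      · have hne : ((k2, v2) == (k, v)) = false := by
          simp [Prod.ext_iff]; tauto
        simp [pvAFlag, h, ih]

-- sorted2 over fst/snd is sorted with the lexicographic key
lemma foldl_insertBy_congr {α : Type} (f g : α → α → Bool) (h : ∀ a b, f a b = g a b)
    (xs : List α) (acc : List α) :
    xs.foldl (fun acc x => PySem.List.insertBy f x acc) acc
      = xs.foldl (fun acc x => PySem.List.insertBy g x acc) acc := by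
  have : f = g := funext fun a => funext fun b => h a b
  rw [this]

lemma sorted2_eq_sorted_lex (xs : List (String × String)) :
    PySem.List.sorted2 xs (·.1) (·.2) false
      = PySem.List.sorted xs (fun p => toLex p) false := by
  show xs.foldl _ [] = xs.foldl _ []
  apply foldl_insertBy_congr
  intro a b
  rcases lt_trichotomy a.1 b.1 with h | h | h
  · simp [h, not_lt_of_gt h, Prod.Lex.lt_iff]
  · simp [h, Prod.Lex.lt_iff]
  · simp [h, not_lt_of_gt h, ne_of_gt h, Prod.Lex.lt_iff]

lemma pairwise_lt_sorted_lex (xs : List (String × String)) (h : xs.Nodup) :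
    (PySem.List.sorted xs (fun p => toLex p) false).Pairwise
      (fun a b => toLex a < toLex b) := by
  have h1 := PySem.List.sorted_pairwise xs (fun p => toLex p)
  have h2 : (PySem.List.sorted xs (fun p => toLex p) false).Nodup :=
    ((PySem.List.sorted_perm xs (fun p => toLex p) false).nodup_iff).mpr h
  exact (h1.and h2).imp (fun {a b} hab =>
    lt_of_le_of_ne hab.1 (fun he => hab.2 (toLex_inj.mp he)))

-- the sweep over strictly sorted lists is a fold of the filtered list
lemma pvSweep_eq_foldl_filter (out : PySem.Dict String String)
    (t c : List (String × String))
    (ht : t.Pairwise (fun a b => toLex a < toLex b))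
    (hc : c.Pairwise (fun a b => toLex a < toLex b)) :
    pvSweep out t c
      = (t.filter (fun p => !c.contains p)).foldl (fun d p => d.insert p.1 p.2) out := by
  induction out, t, c using pvSweep.induct with
  | case1 out c => simp [pvSweep]
  | case2 out x t ih =>
      simp only [pvSweep, List.contains_nil, Bool.not_false, List.filter_true] at *
      rw [ih (ht.of_cons) List.Pairwise.nil]
      simp
  | case3 out x t y c hlt ih =>
      have hyx : toLex y < toLex x := (pvLtP_iff y x).mp hlt
      have hnotin : ∀ p ∈ x :: t, ¬ (y == p) = true := by
        intro p hp hbe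
        have hyp : y = p := by simpa using hbe
        have hyltp : toLex y < toLex p := by
          rcases List.mem_cons.mp hp with h | h
          · subst h; exact hyx
          · exact hyx.trans ((List.pairwise_cons.mp ht).1 p h)
        exact lt_irrefl _ (hyp ▸ hyltp)
      rw [pvSweep, if_pos hlt, ih ht (hc.of_cons)]
      congr 1
      apply List.filter_congr
      intro p hp
      have hne : ¬ p = y := fun hpe => (hnotin p hp) (by simp [hpe])
      rw [contains_cons_of_ne y p c hne]
  | case4 out t y c hlt ih =>
      rw [pvSweep, if_neg (by simpa using hlt), if_pos rfl,
        ih (ht.of_cons) (hc.of_cons)]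
      rw [List.filter_cons_of_neg (by simp)]
      congr 1
      apply List.filter_congr
      intro p hp
      have hxp : toLex y < toLex p := (List.pairwise_cons.mp ht).1 p hp
      have hne : ¬ p = y := fun hpe => lt_irrefl _ (hpe ▸ hxp)
      rw [contains_cons_of_ne y p c hne]
  | case5 out x t y c hlt heq ih =>
      have hxy : toLex x < toLex y := by
        rcases lt_trichotomy (toLex x) (toLex y) with h | h | h
        · exact h
        · exact absurd (toLex_inj.mp h) (fun hxe => heq hxe.symm)
        · exact absurd ((pvLtP_iff y x).mpr h) (by simpa using hlt)
      have hxnot : ((y :: c).contains x) = false := by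
        simp only [List.contains_cons, Bool.or_eq_false_iff]
        constructor
        · simp only [beq_eq_false_iff_ne, ne_eq]
          exact fun hxe => lt_irrefl _ (hxe ▸ hxy)
        · by_contra hmem
          simp only [Bool.not_eq_false, List.contains_iff_mem] at hmem
          have hyz : toLex y < toLex x := (List.pairwise_cons.mp hc).1 x hmem
          exact lt_irrefl _ (hxy.trans hyz)
      rw [pvSweep, if_neg (by simpa using hlt), if_neg heq, ih (ht.of_cons) hc,
        List.filter_cons_of_pos (by rw [hxnot]; rfl)]
      simp

-- fold of fresh distinct-key inserts into the empty dict has exactly those items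
lemma items_foldl_insert_empty (l : List (String × String))
    (hnd : (l.map Prod.fst).Nodup) :
    ((l.foldl (fun d p => d.insert p.1 p.2) PySem.Dict.empty) :
        PySem.Dict String String).items = l := by
  have h := PySem.Dict.items_foldl_insert_fresh l Prod.fst Prod.snd
      (PySem.Dict.empty : PySem.Dict String String)
      (fun a _ => PySem.Dict.contains_empty _) hnd
  simpa using h

-- ===== VERDICT (by name: the statement is the Claim_ definition above) =====
theorem CompareDictionary_spec : Claim_equal_CompareDictionary := by
  intro Target Comp _ hpre
  obtain ⟨hT, hC⟩ := hpre
  have hTn : Target.Nodup := hT.of_map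
  have hCn : Comp.Nodup := hC.of_map
  unfold Spec_CompareDictionary
  -- names
  set keep : String × String → Bool := fun p => !Comp.contains p with hkeep
  -- ===== A's value =====
  have hAfold :
      (Target.foldl (fun d p => if pvAFlag p.1 p.2 Comp then d.insert p.1 p.2 else d)
          (PySem.Dict.empty : PySem.Dict String String))
        = ((Target.filter (fun p => pvAFlag p.1 p.2 Comp)).foldl
            (fun d p => d.insert p.1 p.2) PySem.Dict.empty) := by
    rw [List.foldl_filter]
  have hfilter_eq : Target.filter (fun p => pvAFlag p.1 p.2 Comp) = Target.filter keep := by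
    apply List.filter_congr
    intro p _
    rw [pvAFlag_eq_not_contains]
  have hsubT : (Target.filter keep).Sublist Target := List.filter_sublist
  have hndf : ((Target.filter keep).map Prod.fst).Nodup := (hsubT.map Prod.fst).nodup hT
  have hRet :
      ((Target.foldl (fun d p => if pvAFlag p.1 p.2 Comp then d.insert p.1 p.2 else d)
          (PySem.Dict.empty : PySem.Dict String String))).items = Target.filter keep := by
    rw [hAfold, hfilter_eq, items_foldl_insert_empty _ hndf]
  -- final sorted-dict of A: Dict.ofList is update empty = foldl insert
  have hOf : ∀ (L : List (String × String)), (L.map Prod.fst).Nodup →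
      (PySem.Dict.ofList L).items = L := by
    intro L hnd
    show ((L.foldl (fun d p => d.insert p.1 p.2) PySem.Dict.empty) :
        PySem.Dict String String).items = L
    exact items_foldl_insert_empty L hnd
  have hSortNd : ((PySem.List.sorted2 (Target.filter keep) (·.1) (·.2)).map Prod.fst).Nodup :=
    (((PySem.List.sorted2_perm (Target.filter keep) (·.1) (·.2) false).map
        Prod.fst).nodup_iff).mpr hndf
  have hA : CompareDictionary Target Comp
      = PySem.List.sorted2 (Target.filter keep) (·.1) (·.2) := by
    show (PySem.Dict.ofList (PySem.List.sorted2
        (Target.foldl (fun d p => if pvAFlag p.1 p.2 Comp then d.insert p.1 p.2 else d)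
          (PySem.Dict.empty : PySem.Dict String String)).items (·.1) (·.2))).items = _
    rw [hRet, hOf _ hSortNd]
  -- ===== B's value =====
  have htP : (PySem.List.sorted2 Target (·.1) (·.2)).Pairwise (fun a b => toLex a < toLex b) := by
    rw [sorted2_eq_sorted_lex]; exact pairwise_lt_sorted_lex Target hTn
  have hcP : (PySem.List.sorted2 Comp (·.1) (·.2)).Pairwise (fun a b => toLex a < toLex b) := by
    rw [sorted2_eq_sorted_lex]; exact pairwise_lt_sorted_lex Comp hCn
  have hconc : ∀ p, ((PySem.List.sorted2 Comp (·.1) (·.2)).contains p) = Comp.contains p := by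
    intro p
    have hm := (PySem.List.sorted2_perm Comp (·.1) (·.2) false).mem_iff (a := p)
    rw [Bool.eq_iff_iff]
    simp only [List.contains_iff_mem]
    exact hm
  have hTmapNd : ((PySem.List.sorted2 Target (·.1) (·.2)).map Prod.fst).Nodup :=
    (((PySem.List.sorted2_perm Target (·.1) (·.2) false).map Prod.fst).nodup_iff).mpr hT
  have hfiltNd : (((PySem.List.sorted2 Target (·.1) (·.2)).filter keep).map Prod.fst).Nodup :=
    ((List.filter_sublist.map Prod.fst).nodup) hTmapNd
  have hB : CompareDictionary_alt Target Comp
      = (PySem.List.sorted2 Target (·.1) (·.2)).filter keep := by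
    show (pvSweep PySem.Dict.empty (PySem.List.sorted2 Target (·.1) (·.2))
        (PySem.List.sorted2 Comp (·.1) (·.2))).items = _
    rw [pvSweep_eq_foldl_filter _ _ _ htP hcP]
    have hfc : (PySem.List.sorted2 Target (·.1) (·.2)).filter
        (fun p => !(PySem.List.sorted2 Comp (·.1) (·.2)).contains p)
        = (PySem.List.sorted2 Target (·.1) (·.2)).filter keep := by
      apply List.filter_congr
      intro p _
      rw [hkeep, hconc p]
    rw [hfc, items_foldl_insert_empty _ hfiltNd]
  -- ===== sorting commutes with filtering =====
  rw [hA, hB]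
  rw [sorted2_eq_sorted_lex, sorted2_eq_sorted_lex]
  apply PySem.List.sorted_eq_of_perm_of_pairwise_lt
  · exact (PySem.List.sorted_perm Target (fun p => toLex p) false).filter keep
  · exact (pairwise_lt_sorted_lex Target hTn).sublist List.filter_sublist
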